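-- pv_equiv track=rewrite | github.com/ivango17/Bioinformatics_Challenges | rosalind/consensus_seq.py | base_comp
-- ===== SOURCE A (Python) =====
-- def base_comp(seq_string, base_dict_list):
--     '''This funcation takes a DNA sequence as well as a running list of base counts and returns the list with updated base counts per position.'''
--     if base_dict_list == []:
--         for i in range(len(seq_string)):
--             base_dictionary = {"A" : 0, "C" : 0, "G" : 0, "T" : 0}
--
--             match seq_string[i]:
--                 case "A":
--                     base_dictionary["A"] += 1
--                 case "C":
--                     base_dictionary["C"] += 1
--                 case "G":
--                     base_dictionary["G"] += 1
--                 case "T":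
--                     base_dictionary["T"] += 1
--             base_dict_list.append(base_dictionary)
--
--     else:
--         for i in range(len(base_dict_list)):
--
--             match seq_string[i]:
--                 case "A":
--                     base_dict_list[i]["A"] += 1
--                 case "C":
--                     base_dict_list[i]["C"] += 1
--                 case "G":
--                     base_dict_list[i]["G"] += 1
--                 case "T":
--                     base_dict_list[i]["T"] += 1
--
--     return base_dict_list
-- ===== SOURCE B (Python) =====
-- def base_comp(seq_string, base_dict_list):
--     '''This funcation takes a DNA sequence as well as a running list of base counts and returns the list with updated base counts per position.'''
--     if base_dict_list == []:
--         base_dict_list.extend({"A": 0, "C": 0, "G": 0, "T": 0} for _ in seq_string)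
--     n = len(base_dict_list)
--     for base in ("A", "C", "G", "T"):
--         for i in range(n):
--             if seq_string[i] == base:
--                 base_dict_list[i][base] += 1
--     return base_dict_list
-- ===== Notes on version B (the rewrite author's own statement) =====
-- stated objective: alternative
-- what changed: B first extends an empty list with zero dicts, then counts base-major: four separate passes over the positions, one per nucleotide, each incrementing only that base's key, instead of A's single position-major pass with a four-way match switch; correct because each position matches at most one base, so the per-base passes commute.
import Mathlib
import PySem

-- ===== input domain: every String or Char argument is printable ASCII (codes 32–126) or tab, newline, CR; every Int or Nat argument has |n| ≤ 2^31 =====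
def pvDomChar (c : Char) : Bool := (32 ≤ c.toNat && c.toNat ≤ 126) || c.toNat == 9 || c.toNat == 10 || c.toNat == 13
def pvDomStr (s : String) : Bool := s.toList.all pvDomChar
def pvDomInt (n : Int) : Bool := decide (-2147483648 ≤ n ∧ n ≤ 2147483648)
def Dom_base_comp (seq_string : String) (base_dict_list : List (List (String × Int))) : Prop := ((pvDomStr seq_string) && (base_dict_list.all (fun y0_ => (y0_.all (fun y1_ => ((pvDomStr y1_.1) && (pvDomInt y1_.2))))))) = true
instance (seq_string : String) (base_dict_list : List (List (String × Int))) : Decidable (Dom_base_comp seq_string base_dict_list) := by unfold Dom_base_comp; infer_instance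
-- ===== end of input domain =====

-- B counts base-major (four passes over the positions, one per nucleotide, after extending an
-- empty list with zero dicts) instead of A's single position-major pass with a four-way match
-- switch (objective: alternative).  Both Pythons mutate base_dict_list in place the same way and
-- return that same object; the theorems here are about the return value.

-- ===== PORT A =====
def base_comp (seq_string : String) (base_dict_list : List (List (String × Int))) : List (List (String × Int)) :=
  if base_dict_list = [] then
    -- range(len(seq_string)): the length of a Python str is its number of code points, seq_string.toList.length
    (List.range seq_string.toList.length).foldl (fun acc i =>
      -- the match on seq_string[i]: here i < len(seq_string), so pyGet? is always some and the getD default is never used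
      acc ++ [(if (PySem.Str.pyGet? seq_string (Int.ofNat i)).getD ' ' = 'A' then
                 (PySem.Dict.ofList [("A", (0:Int)), ("C", 0), ("G", 0), ("T", 0)]).modify "A" 0 (· + 1)
               else if (PySem.Str.pyGet? seq_string (Int.ofNat i)).getD ' ' = 'C' then
                 (PySem.Dict.ofList [("A", (0:Int)), ("C", 0), ("G", 0), ("T", 0)]).modify "C" 0 (· + 1)
               else if (PySem.Str.pyGet? seq_string (Int.ofNat i)).getD ' ' = 'G' then
                 (PySem.Dict.ofList [("A", (0:Int)), ("C", 0), ("G", 0), ("T", 0)]).modify "G" 0 (· + 1)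
               else if (PySem.Str.pyGet? seq_string (Int.ofNat i)).getD ' ' = 'T' then
                 (PySem.Dict.ofList [("A", (0:Int)), ("C", 0), ("G", 0), ("T", 0)]).modify "T" 0 (· + 1)
               else
                 PySem.Dict.ofList [("A", (0:Int)), ("C", 0), ("G", 0), ("T", 0)]).items]) []
  else
    (List.range base_dict_list.length).foldl (fun acc i =>
      -- seq_string[i] raises IndexError when i ≥ len(seq_string): those inputs are outside Pre_
      -- (pyGet? = none there; inside Pre_ the getD default is never reached).
      -- base_dict_list[i][K] += 1 raises KeyError when K is absent: outside Pre_ too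
      -- (there Dict.modify would insert the key instead).
      if (PySem.Str.pyGet? seq_string (Int.ofNat i)).getD ' ' = 'A' then
        acc.set i ((PySem.Dict.ofList acc[i]!).modify "A" 0 (· + 1)).items
      else if (PySem.Str.pyGet? seq_string (Int.ofNat i)).getD ' ' = 'C' then
        acc.set i ((PySem.Dict.ofList acc[i]!).modify "C" 0 (· + 1)).items
      else if (PySem.Str.pyGet? seq_string (Int.ofNat i)).getD ' ' = 'G' then
        acc.set i ((PySem.Dict.ofList acc[i]!).modify "G" 0 (· + 1)).items
      else if (PySem.Str.pyGet? seq_string (Int.ofNat i)).getD ' ' = 'T' then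
        acc.set i ((PySem.Dict.ofList acc[i]!).modify "T" 0 (· + 1)).items
      else acc) base_dict_list

-- ===== PORT B =====
-- B-side helpers: seq_string[i] (as in Source B's inner loop; inside Pre_ the getD default is never
-- reached) and the increment l[i][base] += 1 of Source B
def pvC (seq_string : String) (i : Nat) : Char :=
  (PySem.Str.pyGet? seq_string (Int.ofNat i)).getD ' '
def pvUpd (b : Char) (d : List (String × Int)) : List (String × Int) :=
  ((PySem.Dict.ofList d).modify (String.singleton b) 0 (· + 1)).items
def pvZeroDict : List (String × Int) := [("A", 0), ("C", 0), ("G", 0), ("T", 0)]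
-- Source B's inner loop: for i in range(n): if seq_string[i] == base: base_dict_list[i][base] += 1
def pvBasePass (seq_string : String) (b : Char) (n : Nat) (l : List (List (String × Int))) : List (List (String × Int)) :=
  (List.range n).foldl (fun acc i =>
    if pvC seq_string i = b then acc.set i (pvUpd b acc[i]!) else acc) l

def base_comp_alt (seq_string : String) (base_dict_list : List (List (String × Int))) : List (List (String × Int)) :=
  let l := if base_dict_list.isEmpty
           then base_dict_list ++ seq_string.toList.map (fun _ => pvZeroDict)
           else base_dict_list
  -- n = len(base_dict_list); for base in ("A","C","G","T"): inner pass
  ['A', 'C', 'G', 'T'].foldl (fun acc b => pvBasePass seq_string b l.length acc) l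

-- ===== PRECONDITION & SPEC =====
-- Pre_ excludes exactly the inputs on which the Python A raises: a nonempty running list longer than the
-- sequence (IndexError on seq_string[i]) and a nonempty running list whose i-th dict lacks the key for the
-- A/C/G/T character at position i (KeyError on the += 1).
def Pre_base_comp (seq_string : String) (base_dict_list : List (List (String × Int))) : Prop :=
  base_dict_list ≠ [] →
    (base_dict_list.length ≤ seq_string.toList.length ∧
      ∀ i ∈ List.range base_dict_list.length,
        (pvC seq_string i = 'A' ∨ pvC seq_string i = 'C' ∨
         pvC seq_string i = 'G' ∨ pvC seq_string i = 'T') →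
          (PySem.Dict.ofList base_dict_list[i]!).contains (String.singleton (pvC seq_string i)) = true)
instance (seq_string : String) (base_dict_list : List (List (String × Int))) : Decidable (Pre_base_comp seq_string base_dict_list) := by unfold Pre_base_comp; infer_instance

def pvWitness_base_comp : String × (List (List (String × Int))) :=
  ("ACG", [[("A", 3), ("C", 0), ("G", 0), ("T", 1)], [("A", 0), ("C", 2), ("G", 0), ("T", 0)]])

def Spec_base_comp (seq_string : String) (base_dict_list : List (List (String × Int))) (out : List (List (String × Int))) : Prop := out = base_comp_alt seq_string base_dict_list
instance (seq_string : String) (base_dict_list : List (List (String × Int))) (out : List (List (String × Int))) : Decidable (Spec_base_comp seq_string base_dict_list out) := by unfold Spec_base_comp; infer_instance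

-- ===== CLAIM =====
def Claim_equal_base_comp : Prop := ∀ (seq_string : String) (base_dict_list : List (List (String × Int))), Dom_base_comp seq_string base_dict_list → Pre_base_comp seq_string base_dict_list → Spec_base_comp seq_string base_dict_list (base_comp seq_string base_dict_list)

-- ===== LEMMAS AND PROOFS =====

-- A's per-position four-way switch, as one function of the character (proof-side only)
def pvSwitch (ch : Char) (d : List (String × Int)) : List (String × Int) :=
  if ch = 'A' then pvUpd 'A' d
  else if ch = 'C' then pvUpd 'C' d
  else if ch = 'G' then pvUpd 'G' d
  else if ch = 'T' then pvUpd 'T' d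
  else d

lemma pv_step_append {α : Type} [Inhabited α] (M : List α) (v : α) (t : List α) (n : Nat)
    (hn : M.length = n) (P : Prop) [Decidable P] (g : α → α) :
    (if P then (M ++ v :: t).set n (g ((M ++ v :: t)[n]!)) else (M ++ v :: t))
      = M ++ (if P then g v else v) :: t := by
  subst hn
  by_cases hP : P <;> simp [hP]

-- the shape of each counting loop: indices are visited left to right, each touching only its own slot
lemma pv_foldl_set_range {α : Type} [Inhabited α] (p : Nat → Prop) [DecidablePred p]
    (f : Nat → α → α) :
    ∀ (n : Nat) (xs : List α), n ≤ xs.length →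
      (List.range n).foldl (fun acc i => if p i then acc.set i (f i acc[i]!) else acc) xs
        = (List.range n).map (fun i => if p i then f i xs[i]! else xs[i]!) ++ xs.drop n := by
  intro n
  induction n with
  | zero => intro xs _; simp
  | succ n ih =>
    intro xs hn
    have hn' : n < xs.length := by omega
    rw [List.range_succ, List.foldl_append, ih xs (by omega), List.map_append]
    simp only [List.foldl_cons, List.foldl_nil, List.map_cons, List.map_nil]
    rw [List.drop_eq_getElem_cons hn']
    have hx : xs[n]! = xs[n] := by
      simp [List.getElem!_eq_getElem?_getD, List.getElem?_eq_getElem hn']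
    rw [← hx]
    rw [pv_step_append _ _ _ n (by simp) (p n) (f n)]
    simp

lemma pv_get_map_range {α : Type} [Inhabited α] (g : Nat → α) (n i : Nat) (h : i < n) :
    ((List.range n).map g)[i]! = g i := by
  simp [h]

lemma pv_self_map {α : Type} [Inhabited α] (xs : List α) :
    (List.range xs.length).map (fun i => xs[i]!) = xs := by
  apply List.ext_getElem
  · simp
  · intro i h1 h2
    simp [List.getElem!_eq_getElem?_getD, List.getElem?_eq_getElem h2]

-- one base-major pass, on a list given as a map over its indices
lemma pv_pass_map (seq_string : String) (b : Char) (n : Nat) (g : Nat → List (String × Int)) :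
    pvBasePass seq_string b n ((List.range n).map g)
      = (List.range n).map (fun i => if pvC seq_string i = b then pvUpd b (g i) else g i) := by
  unfold pvBasePass
  rw [pv_foldl_set_range (fun i => pvC seq_string i = b) (fun _ d => pvUpd b d) n _ (by simp)]
  have hd : List.drop n (List.map g (List.range n)) = [] := by simp
  rw [hd, List.append_nil]
  apply List.map_congr_left
  intro i hi
  rw [pv_get_map_range g n i (List.mem_range.mp hi)]

-- the whole cascade of base-major passes, pointwise per index
lemma pv_passes (seq_string : String) (n : Nat) :
    ∀ (bs : List Char) (g : Nat → List (String × Int)),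
      bs.foldl (fun acc b => pvBasePass seq_string b n acc) ((List.range n).map g)
        = (List.range n).map (fun i =>
            bs.foldl (fun x b => if pvC seq_string i = b then pvUpd b x else x) (g i)) := by
  intro bs
  induction bs with
  | nil => intro g; simp
  | cons b bs ih =>
    intro g
    rw [List.foldl_cons, pv_pass_map seq_string b n g, ih]
    simp

-- a position matches at most one base, so the four passes together are A's four-way switch
lemma pv_cell4 (ch : Char) (d : List (String × Int)) :
    ['A', 'C', 'G', 'T'].foldl (fun x b => if ch = b then pvUpd b x else x) d
      = pvSwitch ch d := by
  by_cases h1 : ch = 'A'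
  · subst h1; simp [pvSwitch]
  by_cases h2 : ch = 'C'
  · subst h2; simp [pvSwitch]
  by_cases h3 : ch = 'G'
  · subst h3; simp [pvSwitch]
  by_cases h4 : ch = 'T'
  · subst h4; simp [pvSwitch]
  · simp [pvSwitch, h1, h2, h3, h4]

-- A's empty branch as a map of switches over the positions
lemma pv_A_empty (seq_string : String) :
    base_comp seq_string []
      = (List.range seq_string.toList.length).map (fun i => pvSwitch (pvC seq_string i) pvZeroDict) := by
  unfold base_comp
  rw [if_pos rfl, PySem.List.foldl_append_singleton_eq_map]
  apply List.map_congr_left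
  intro i _
  simp only [pvSwitch, pvUpd, pvC, pvZeroDict, pysem]
  by_cases h1 : seq_string.toList[i]?.getD ' ' = 'A'
  · simp [h1, show String.singleton 'A' = "A" from rfl]
  by_cases h2 : seq_string.toList[i]?.getD ' ' = 'C'
  · simp [h2, show String.singleton 'C' = "C" from rfl]
  by_cases h3 : seq_string.toList[i]?.getD ' ' = 'G'
  · simp [h3, show String.singleton 'G' = "G" from rfl]
  by_cases h4 : seq_string.toList[i]?.getD ' ' = 'T'
  · simp [h4, show String.singleton 'T' = "T" from rfl]
  · simp [h1, h2, h3, h4]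
    rfl

-- A's nonempty branch as a map of switches over the positions
lemma pv_A_nonempty (seq_string : String) (l : List (List (String × Int))) (h : l ≠ []) :
    base_comp seq_string l
      = (List.range l.length).map (fun i => pvSwitch (pvC seq_string i) l[i]!) := by
  unfold base_comp
  rw [if_neg h]
  have hbody : (fun (acc : List (List (String × Int))) (i : Nat) =>
      if (PySem.Str.pyGet? seq_string (Int.ofNat i)).getD ' ' = 'A' then
        acc.set i ((PySem.Dict.ofList acc[i]!).modify "A" 0 (· + 1)).items
      else if (PySem.Str.pyGet? seq_string (Int.ofNat i)).getD ' ' = 'C' then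
        acc.set i ((PySem.Dict.ofList acc[i]!).modify "C" 0 (· + 1)).items
      else if (PySem.Str.pyGet? seq_string (Int.ofNat i)).getD ' ' = 'G' then
        acc.set i ((PySem.Dict.ofList acc[i]!).modify "G" 0 (· + 1)).items
      else if (PySem.Str.pyGet? seq_string (Int.ofNat i)).getD ' ' = 'T' then
        acc.set i ((PySem.Dict.ofList acc[i]!).modify "T" 0 (· + 1)).items
      else acc)
      = (fun acc i =>
          if (pvC seq_string i = 'A' ∨ pvC seq_string i = 'C' ∨
              pvC seq_string i = 'G' ∨ pvC seq_string i = 'T') then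
            acc.set i (pvSwitch (pvC seq_string i) acc[i]!) else acc) := by
    funext acc i
    simp only [pvSwitch, pvUpd, pvC, pysem]
    by_cases h1 : seq_string.toList[i]?.getD ' ' = 'A'
    · simp [h1, show String.singleton 'A' = "A" from rfl]
    by_cases h2 : seq_string.toList[i]?.getD ' ' = 'C'
    · simp [h2, show String.singleton 'C' = "C" from rfl]
    by_cases h3 : seq_string.toList[i]?.getD ' ' = 'G'
    · simp [h3, show String.singleton 'G' = "G" from rfl]
    by_cases h4 : seq_string.toList[i]?.getD ' ' = 'T'
    · simp [h4, show String.singleton 'T' = "T" from rfl]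
    · simp [h1, h2, h3, h4]
  rw [hbody]
  rw [pv_foldl_set_range _ (fun i d => pvSwitch (pvC seq_string i) d) l.length l (le_refl _)]
  rw [List.drop_length, List.append_nil]
  apply List.map_congr_left
  intro i _
  by_cases hp : (pvC seq_string i = 'A' ∨ pvC seq_string i = 'C' ∨
      pvC seq_string i = 'G' ∨ pvC seq_string i = 'T')
  · rw [if_pos hp]
  · rw [if_neg hp]
    simp only [not_or] at hp
    obtain ⟨n1, n2, n3, n4⟩ := hp
    simp [pvSwitch, n1, n2, n3, n4]

-- B's cascade of passes over any list, pointwise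
lemma pv_B_map (seq_string : String) (l : List (List (String × Int))) :
    ['A', 'C', 'G', 'T'].foldl (fun acc b => pvBasePass seq_string b l.length acc) l
      = (List.range l.length).map (fun i => pvSwitch (pvC seq_string i) l[i]!) := by
  have h := pv_passes seq_string l.length ['A', 'C', 'G', 'T'] (fun i => l[i]!)
  rw [pv_self_map l] at h
  rw [h]
  apply List.map_congr_left
  intro i _
  rw [pv_cell4]

-- ===== VERDICT =====
theorem base_comp_spec : Claim_equal_base_comp := by
  intro seq_string base_dict_list _ _
  unfold Spec_base_comp base_comp_alt
  simp only []
  rw [pv_B_map]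
  by_cases h : base_dict_list = []
  · subst h
    simp only [List.isEmpty_nil, if_true, List.nil_append, List.length_map]
    rw [pv_A_empty]
    apply List.map_congr_left
    intro i hi
    have hi' : i < seq_string.toList.length := List.mem_range.mp hi
    have hz : (seq_string.toList.map (fun _ => pvZeroDict))[i]! = pvZeroDict := by
      have hi2 : i < seq_string.length := by simpa using hi'
      simp [hi2]
    rw [hz]
  · have hne : base_dict_list.isEmpty = false := by simp [h]
    simp only [hne, Bool.false_eq_true, if_false]
    rw [pv_A_nonempty seq_string base_dict_list h]
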